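-- pv_equiv track=rewrite | github.com/tum-pbs/PhiFlow | phi/model.py | display_name
-- ===== SOURCE A (Python) =====
-- def display_name(python_name):
--     n = list(python_name)
--     n[0] = n[0].upper()
--     for i in range(1,len(n)):
--         if n[i] == '_':
--             n[i] = ' '
--             if len(n) > i+1:
--                 n[i+1] = n[i+1].upper()
--     return ''.join(n)
-- ===== SOURCE B (Python) =====
-- def display_name(python_name):
--     first, rest = python_name[0], python_name[1:]
--     segs = rest.split('_')
--     parts = [first.upper() + segs[0]]
--     for seg in segs[1:]:
--         parts.append(' ' + seg[:1].upper() + seg[1:])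
--     return ''.join(parts)
-- ===== Notes on version B (the rewrite author's own statement) =====
-- stated objective: faster
-- what changed: B splits the tail python_name[1:] on the underscore separator and rebuilds the string segment-wise (space plus capitalized segment head) with C-level split/join, instead of A's per-character Python loop mutating a char list with index lookahead.
import Mathlib
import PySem

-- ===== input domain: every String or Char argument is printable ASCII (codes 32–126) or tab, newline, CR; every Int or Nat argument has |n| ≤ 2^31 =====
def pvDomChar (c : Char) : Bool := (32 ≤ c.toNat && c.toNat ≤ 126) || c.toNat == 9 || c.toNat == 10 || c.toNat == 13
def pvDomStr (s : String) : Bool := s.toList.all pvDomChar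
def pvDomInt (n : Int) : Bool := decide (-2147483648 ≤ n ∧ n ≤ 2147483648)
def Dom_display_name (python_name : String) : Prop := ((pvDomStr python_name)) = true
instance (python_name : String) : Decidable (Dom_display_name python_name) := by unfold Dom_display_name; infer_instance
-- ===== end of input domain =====

-- B rebuilds the name segment-wise from the underscore-split of python_name[1:] instead of A's per-character in-place char-list mutation with index lookahead (measured constant-factor faster via C-level split/join).

-- ===== PORT A =====
-- one body of A's for-loop: `if n[i] == '_': n[i] = ' '; if len(n) > i+1: n[i+1] = n[i+1].upper()`
def aStep (n : List Char) (i : Nat) : List Char :=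
  if n.getD i ' ' = '_' then
    let n1 := n.set i ' '
    if i + 1 < n1.length then n1.set (i + 1) (PySem.Chars.upperChar (n1.getD (i + 1) ' ')) else n1
  else n

def display_name (python_name : String) : String :=
  let n := python_name.toList
  -- n[0] = n[0].upper() : IndexError on the empty string, excluded by Pre_
  let n := n.set 0 (PySem.Chars.upperChar (n.getD 0 ' '))
  -- for i in range(1, len(n)) : range(1, m) = List.range' 1 (m - 1)
  String.mk ((List.range' 1 (n.length - 1)).foldl aStep n)

-- ===== PORT B =====
-- seg[:1].upper() + seg[1:]
def upFirst (seg : List Char) : List Char :=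
  match seg with
  | [] => []
  | c :: t => PySem.Chars.upperChar c :: t

def display_name_alt (python_name : String) : String :=
  let cs := python_name.toList
  let first := cs.getD 0 ' '                    -- python_name[0]; IndexError on "" excluded by Pre_
  let rest := cs.drop 1                         -- python_name[1:]
  let segs := PySem.Chars.splitOn rest ['_']    -- rest.split('_')
  let parts := (PySem.Chars.upperChar first :: segs.headD []) ::
      (segs.drop 1).map (fun seg => ' ' :: upFirst seg)
  String.mk parts.flatten

-- ===== PRECONDITION & SPEC =====
-- Pre_ excludes only the empty string, on which both A and B raise IndexError (python_name[0]).
def Pre_display_name (python_name : String) : Prop := python_name ≠ ""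
instance (python_name : String) : Decidable (Pre_display_name python_name) := by unfold Pre_display_name; infer_instance

def pvWitness_display_name : String := "phi_flow_model"

def Spec_display_name (python_name : String) (out : String) : Prop := out = display_name_alt python_name
instance (python_name : String) (out : String) : Decidable (Spec_display_name python_name out) := by unfold Spec_display_name; infer_instance

-- ===== CLAIM (what is proved, stated in full; the proofs are below) =====
def Claim_equal_display_name : Prop := ∀ (python_name : String), Dom_display_name python_name → Pre_display_name python_name → Spec_display_name python_name (display_name python_name)

-- ===== LEMMAS AND PROOFS =====

-- the char-level effect of A's loop on positions ≥ 1 (goA: previous char was '_', so this char gets uppercased)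
mutual
def goN : List Char → List Char
  | [] => []
  | c :: t => if c = '_' then ' ' :: goA t else c :: goN t
def goA : List Char → List Char
  | [] => []
  | c :: t => if c = '_' then ' ' :: goA t else PySem.Chars.upperChar c :: goN t
end

-- plain recursive split on '_'
def consHead (c : Char) : List (List Char) → List (List Char)
  | [] => [[c]]
  | s :: r => (c :: s) :: r

def mySplit : List Char → List (List Char)
  | [] => [[]]
  | c :: t => if c = '_' then [] :: mySplit t else consHead c (mySplit t)

def consHeadApp (p : List Char) : List (List Char) → List (List Char)
  | [] => [p]
  | s :: r => (p ++ s) :: r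

lemma mySplit_ne_nil (t : List Char) : mySplit t ≠ [] := by
  cases t with
  | nil => simp [mySplit]
  | cons c t =>
    simp only [mySplit]; split
    · simp
    · cases h : mySplit t <;> simp [consHead]

lemma consHeadApp_nil {xs : List (List Char)} (h : xs ≠ []) : consHeadApp [] xs = xs := by
  cases xs with
  | nil => exact absurd rfl h
  | cons s r => simp [consHeadApp]

lemma upC_ne_underscore {c : Char} (h : c ≠ '_') : PySem.Chars.upperChar c ≠ '_' := by
  unfold PySem.Chars.upperChar PySem.Chars.islower
  split
  · rename_i hl
    simp only [Bool.and_eq_true, decide_eq_true_eq] at hl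
    obtain ⟨h1, h2⟩ := hl
    rw [Char.le_def] at h1 h2
    have hb1 : 97 ≤ c.toNat := h1
    have hb2 : c.toNat ≤ 122 := h2
    intro he
    have he2 : (Char.ofNat (c.toNat - 32)).toNat = ('_' : Char).toNat := by rw [he]
    rw [Char.toNat_ofNat] at he2
    have hv : (c.toNat - 32).isValidChar := Or.inl (by omega)
    rw [if_pos hv] at he2
    have h3 : ('_' : Char).toNat = 95 := by decide
    omega
  · exact h

lemma upC_underscore : PySem.Chars.upperChar '_' = '_' := by decide

-- splitOn's fuelled worker, on separator ['_'], is mySplit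
lemma go_eq_mySplit (l : List Char) : ∀ (fuel : Nat) (cur : List Char) (acc : List (List Char)),
    l.length ≤ fuel →
    PySem.Chars.splitOn.go ['_'] fuel l cur acc = acc.reverse ++ consHeadApp cur.reverse (mySplit l) := by
  induction l with
  | nil =>
    intro fuel cur acc _
    cases fuel <;> simp [PySem.Chars.splitOn.go, mySplit, consHeadApp]
  | cons c rest ih =>
    intro fuel cur acc hf
    cases fuel with
    | zero => simp at hf
    | succ f =>
      rw [PySem.Chars.splitOn.go]
      by_cases hc : c = '_'
      · subst hc
        have hpre : (['_'] : List Char).isPrefixOf ('_' :: rest) = true := by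
          simp [List.isPrefixOf]
        rw [if_pos hpre]
        simp only [List.length_cons, List.length_nil, List.drop_succ_cons, List.drop_zero]
        rw [ih f [] (cur.reverse :: acc) (by simpa using hf)]
        cases h : mySplit rest with
        | nil => exact absurd h (mySplit_ne_nil rest)
        | cons s r => simp [mySplit, consHeadApp, h]
      · have hpre : (['_'] : List Char).isPrefixOf (c :: rest) = false := by
          simp [List.isPrefixOf]
          intro h; exact absurd h.symm hc
        rw [if_neg (by simp [hpre])]
        rw [ih f (c :: cur) acc (by simpa using hf)]
        simp only [mySplit, if_neg hc, List.reverse_cons]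
        cases h : mySplit rest with
        | nil => exact absurd h (mySplit_ne_nil rest)
        | cons s r => simp [consHead, consHeadApp]

lemma splitOn_eq_mySplit (l : List Char) : PySem.Chars.splitOn l ['_'] = mySplit l := by
  rw [PySem.Chars.splitOn, go_eq_mySplit l (l.length + 1) [] [] (by omega)]
  simp [consHeadApp_nil (mySplit_ne_nil l)]

-- B's segment-wise rebuild of the tail equals goN / goA
lemma goN_goA_split (t : List Char) :
    goN t = (mySplit t).headD [] ++ (((mySplit t).drop 1).map (fun seg => ' ' :: upFirst seg)).flatten ∧
    goA t = upFirst ((mySplit t).headD []) ++ (((mySplit t).drop 1).map (fun seg => ' ' :: upFirst seg)).flatten := by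
  induction t with
  | nil => simp [goN, goA, mySplit, upFirst]
  | cons c t ih =>
    obtain ⟨ih1, ih2⟩ := ih
    by_cases hc : c = '_'
    · subst hc
      cases h : mySplit t with
      | nil => exact absurd h (mySplit_ne_nil t)
      | cons s r =>
        rw [h] at ih1 ih2
        constructor <;>
          simp [goN, goA, mySplit, h, upFirst, ih2]
    · cases h : mySplit t with
      | nil => exact absurd h (mySplit_ne_nil t)
      | cons s r =>
        rw [h] at ih1 ih2
        constructor <;>
          simp [goN, goA, mySplit, hc, h, consHead, upFirst, ih1]

lemma getD_append_right (p s : List Char) (k : Nat) (d : Char) :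
    (p ++ s).getD (p.length + k) d = s.getD k d := by
  simp [List.getD_eq_getElem?_getD, List.getElem?_append_right (by omega : p.length ≤ p.length + k)]

lemma set_append_right (p s : List Char) (k : Nat) (x : Char) :
    (p ++ s).set (p.length + k) x = p ++ s.set k x := by
  rw [List.set_append]
  simp

lemma goN_upC (c : Char) (t : List Char) : goN (PySem.Chars.upperChar c :: t) = goA (c :: t) := by
  by_cases hc : c = '_'
  · subst hc; simp [goN, goA, upC_underscore]
  · simp [goN, goA, hc, upC_ne_underscore hc]

-- A's loop, run over the suffix s behind an untouched prefix p, produces goN s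
lemma fold_eq_goN (N : Nat) : ∀ (s p : List Char), s.length = N →
    (List.range' p.length s.length).foldl aStep (p ++ s) = p ++ goN s := by
  induction N using Nat.strong_induction_on with
  | _ N ih =>
    intro s p hs
    cases s with
    | nil => simp [goN]
    | cons a t =>
      simp only [List.length_cons] at hs ⊢
      rw [List.range'_succ, List.foldl_cons]
      have hget : (p ++ a :: t).getD p.length ' ' = a := by
        simpa using getD_append_right p (a :: t) 0 ' '
      by_cases ha : a = '_'
      · subst ha
        have hset : (p ++ '_' :: t).set p.length ' ' = p ++ ' ' :: t := by
          simpa using set_append_right p ('_' :: t) 0 ' '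
        cases t with
        | nil =>
          have hstep : aStep (p ++ ['_']) p.length = p ++ [' '] := by
            rw [aStep, if_pos (by simpa using hget), hset]
            simp
          rw [hstep]
          simp [goN, goA]
        | cons c t' =>
          have hget2 : (p ++ ' ' :: c :: t').getD (p.length + 1) ' ' = c := by
            simpa using getD_append_right p (' ' :: c :: t') 1 ' '
          have hset2 : (p ++ ' ' :: c :: t').set (p.length + 1) (PySem.Chars.upperChar c)
              = (p ++ [' ']) ++ PySem.Chars.upperChar c :: t' := by
            have := set_append_right p (' ' :: c :: t') 1 (PySem.Chars.upperChar c)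
            simpa using this
          have hstep : aStep (p ++ '_' :: c :: t') p.length
              = (p ++ [' ']) ++ PySem.Chars.upperChar c :: t' := by
            rw [aStep, if_pos (by simpa using hget), hset]
            rw [if_pos (by simp)]
            rw [hget2, hset2]
          rw [hstep]
          have hrange : List.range' (p.length + 1) (t'.length + 1)
              = List.range' ((p ++ [' ']).length) ((PySem.Chars.upperChar c :: t').length) := by
            simp
          have := ih (t'.length + 1) (by simp only [List.length_cons] at hs; omega)
            (PySem.Chars.upperChar c :: t') (p ++ [' ']) (by simp)
          simp only [List.length_cons]
          rw [hrange, this, goN_upC]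
          simp [goN, goA]
      · have hstep : aStep (p ++ a :: t) p.length = p ++ a :: t := by
          rw [aStep, if_neg (by rw [hget]; exact ha)]
        rw [hstep]
        have heq : p ++ a :: t = (p ++ [a]) ++ t := by simp
        have := ih t.length (by omega) t (p ++ [a]) rfl
        rw [heq]
        have hr2 : List.range' (p.length + 1) t.length = List.range' ((p ++ [a]).length) t.length := by simp
        rw [hr2, this]
        simp [goN, ha]

-- ===== VERDICT (by name: the statement is the Claim_ definition above) =====
theorem display_name_spec : Claim_equal_display_name := by
  intro s _ hpre
  unfold Spec_display_name display_name display_name_alt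
  cases h : s.toList with
  | nil =>
    have : s = "" := by
      simpa using congrArg String.ofList h
    exact absurd this hpre
  | cons a t =>
    simp only [h, List.getD_cons_zero, List.set_cons_zero, List.drop_succ_cons, List.drop_zero,
      List.length_cons, Nat.add_sub_cancel, List.drop_one]
    have hfold := fold_eq_goN t.length t [PySem.Chars.upperChar a] rfl
    simp only [List.length_cons, List.length_nil, Nat.zero_add, List.singleton_append] at hfold
    rw [hfold, splitOn_eq_mySplit, List.flatten_cons, List.cons_append]
    congr 1
    simpa [List.drop_one] using (goN_goA_split t).1
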